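-- pv_equiv track=rewrite | github.com/DavidMChan/Anamnesis | worker/src/scoring.py | compute_cross_product
-- ===== SOURCE A (Python) =====
-- from typing import Dict, List, Optional, Tuple
-- from itertools import product as cartesian_product
--
-- DemographicFilter = Dict[str, list]  # { "c_age": ["18-24", "25-34"], ... }
--
-- def compute_cross_product(
--     filters: DemographicFilter,
-- ) -> Tuple[List[str], List[Dict[str, str]]]:
--     """
--     Compute the cross-product of selected categories across dimensions.
--
--     Returns (dimensions, groups) where each group is {dim_key: category}.
--     """
--     dimensions: List[str] = []
--     value_arrays: List[List[str]] = []
--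
--     for key, val in filters.items():
--         if key == "_sample_size":
--             continue
--         if key.startswith("custom_"):
--             continue
--         if not val or not isinstance(val, list) or len(val) == 0:
--             continue
--         dimensions.append(key)
--         value_arrays.append(val)
--
--     if not dimensions:
--         return [], []
--
--     groups = []
--     for combo in cartesian_product(*value_arrays):
--         group = {dimensions[i]: combo[i] for i in range(len(dimensions))}
--         groups.append(group)
--
--     return dimensions, groups
-- ===== SOURCE B (Python) =====
-- def compute_cross_product(filters):
--     pairs = [
--         (key, val)
--         for key, val in filters.items()
--         if key != "_sample_size"
--         and not key.startswith("custom_")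
--         and val and isinstance(val, list) and len(val) != 0
--     ]
--     if not pairs:
--         return [], []
--     groups = [{}]
--     for dim, values in pairs:
--         groups = [{**g, dim: v} for g in groups for v in values]
--     return [k for k, _ in pairs], groups
-- ===== Notes on version B (the rewrite author's own statement) =====
-- stated objective: alternative
-- what changed: Replaces the two-phase build (collect parallel dimension/value lists, generate index tuples with itertools.product, then map indices into dicts) by a single filtered pair list and an incremental fold that expands partial group dicts one dimension at a time, building the dicts directly.
import Mathlib
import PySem

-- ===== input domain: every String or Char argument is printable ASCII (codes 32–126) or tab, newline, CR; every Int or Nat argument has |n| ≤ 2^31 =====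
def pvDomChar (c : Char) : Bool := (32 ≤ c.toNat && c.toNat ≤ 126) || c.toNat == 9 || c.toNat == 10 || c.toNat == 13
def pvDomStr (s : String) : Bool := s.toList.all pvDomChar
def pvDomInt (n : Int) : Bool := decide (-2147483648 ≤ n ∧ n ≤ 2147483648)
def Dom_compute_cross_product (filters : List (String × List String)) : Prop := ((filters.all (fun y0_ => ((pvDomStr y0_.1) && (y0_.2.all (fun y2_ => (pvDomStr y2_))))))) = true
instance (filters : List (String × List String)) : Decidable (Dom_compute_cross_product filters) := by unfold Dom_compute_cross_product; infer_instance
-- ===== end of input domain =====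

-- ===== PORT A =====
-- B differs from A in decomposition only: one filtered pair list + an incremental fold
-- building the group dicts directly, instead of parallel lists + itertools.product + index mapping.
-- the loop body of A's collection pass (same skip chain, same order)
def ccpStep (acc : List String × List (List String)) (kv : String × List String) :
    List String × List (List String) :=
  if kv.1 == "_sample_size" then acc
  else if PySem.Str.startswith kv.1 "custom_" then acc
  else if kv.2.isEmpty then acc
  else (acc.1 ++ [kv.1], acc.2 ++ [kv.2])

-- itertools.product(*value_arrays), last dimension varying fastest (exact for lists of strings)
def prodA : List (List String) → List (List String)
  | [] => [[]]
  | vs :: rest => vs.flatMap (fun v => (prodA rest).map (fun t => v :: t))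

def compute_cross_product (filters : List (String × List String)) : List String × (List (List (String × String))) :=
  let acc := filters.foldl ccpStep ([], [])
  let dimensions := acc.1
  let value_arrays := acc.2
  if dimensions.isEmpty then ([], [])
  else
    let groups := (prodA value_arrays).map
      (fun combo => (List.range dimensions.length).map
        (fun i => (dimensions.getD i "", combo.getD i "")))
    (dimensions, groups)

-- ===== PORT B =====
-- B's comprehension condition for keeping a (key, val) pair
def ccpKeep (kv : String × List String) : Bool :=
  kv.1 != "_sample_size" && !(PySem.Str.startswith kv.1 "custom_") && !kv.2.isEmpty

-- B's loop body: expand every partial group by one dimension ({**g, dim: v})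
def ccpExpand (gs : List (List (String × String))) (kv : String × List String) :
    List (List (String × String)) :=
  gs.flatMap (fun g => kv.2.map (fun v => g ++ [(kv.1, v)]))

def compute_cross_product_alt (filters : List (String × List String)) : List String × (List (List (String × String))) :=
  let pairs := filters.filter ccpKeep
  if pairs.isEmpty then ([], [])
  else (pairs.map Prod.fst, pairs.foldl ccpExpand [[]])

-- ===== PRECONDITION & SPEC =====
-- Pre_ states the representation invariant of A's dict parameter: an association list standing
-- for a Python dict has pairwise-distinct keys (a Python dict cannot carry duplicate keys).
def Pre_compute_cross_product (filters : List (String × List String)) : Prop :=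
  (filters.map Prod.fst).Nodup
instance (filters : List (String × List String)) : Decidable (Pre_compute_cross_product filters) := by unfold Pre_compute_cross_product; infer_instance

def pvWitness_compute_cross_product : (List (String × List String)) :=
  [("a", ["1", "2"]), ("_sample_size", ["9"]), ("b", ["x"])]

def Spec_compute_cross_product (filters : List (String × List String)) (out : List String × (List (List (String × String)))) : Prop := out = compute_cross_product_alt filters
instance (filters : List (String × List String)) (out : List String × (List (List (String × String)))) : Decidable (Spec_compute_cross_product filters out) := by unfold Spec_compute_cross_product; infer_instance

-- ===== CLAIM (what is proved, stated in full; the proofs are below) =====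
def Claim_equal_compute_cross_product : Prop := ∀ (filters : List (String × List String)), Dom_compute_cross_product filters → Pre_compute_cross_product filters → Spec_compute_cross_product filters (compute_cross_product filters)

-- ===== LEMMAS AND PROOFS =====

-- A's skip chain keeps a pair exactly when B's condition holds
theorem ccpStep_eq (acc : List String × List (List String)) (kv : String × List String) :
    ccpStep acc kv = if ccpKeep kv then (acc.1 ++ [kv.1], acc.2 ++ [kv.2]) else acc := by
  cases h1 : (kv.1 == "_sample_size") <;>
    cases h2 : PySem.Str.startswith kv.1 "custom_" <;>
    cases h3 : kv.2.isEmpty <;>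
    simp only [ccpStep, ccpKeep, h1, h2, h3, bne, Bool.not_true, Bool.not_false,
      Bool.and_true, Bool.and_false, Bool.and_self,
      if_true, if_false, Bool.false_eq_true]

-- A's accumulator-based collection equals B's filter, split into the two parallel lists
theorem collect_eq_filter (filters : List (String × List String))
    (d : List String) (v : List (List String)) :
    filters.foldl ccpStep (d, v)
    = (d ++ (filters.filter ccpKeep).map Prod.fst,
       v ++ (filters.filter ccpKeep).map Prod.snd) := by
  induction filters generalizing d v with
  | nil => simp
  | cons kv rest ih =>
    rw [List.foldl_cons, ccpStep_eq, List.filter_cons]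
    by_cases hk : ccpKeep kv
    · simp only [hk, if_true, ih, List.map_cons, List.cons_append, List.append_assoc,
        List.nil_append]
    · simp only [hk, if_false, ih, Bool.false_eq_true]

-- every combo produced by prodA has one value per dimension
theorem prodA_length (vas : List (List String)) :
    ∀ c ∈ prodA vas, c.length = vas.length := by
  induction vas with
  | nil => intro c hc; simp [prodA] at hc; simp [hc]
  | cons vs rest ih =>
    intro c hc
    simp only [prodA, List.mem_flatMap, List.mem_map] at hc
    obtain ⟨v, _, t, ht, rfl⟩ := hc
    simp [ih t ht]

-- the index-comprehension dict equals the zip when lengths agree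
theorem range_map_eq_zip (dims : List String) (combo : List String)
    (h : combo.length = dims.length) :
    (List.range dims.length).map (fun i => (dims.getD i "", combo.getD i ""))
      = dims.zip combo := by
  induction dims generalizing combo with
  | nil => simp
  | cons dd ds ih =>
    cases combo with
    | nil => simp at h
    | cons c cs =>
      rw [List.length_cons, List.range_succ_eq_map, List.map_cons, List.map_map,
        List.zip_cons_cons]
      refine congrArg₂ List.cons rfl ?_
      rw [← ih cs (by simpa using h)]
      apply List.map_congr_left
      intro i _
      rfl

-- flatMap associativity, stated here to be citable by name in fold_groups
theorem flatMap_flatMap' {A B C : Type} (l : List A) (f : A → List B) (g : B → List C) :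
    (l.flatMap f).flatMap g = l.flatMap (fun x => (f x).flatMap g) := by
  induction l with
  | nil => simp
  | cons x xs ih => simp [ih]

-- main loop invariant: B's incremental fold expands each partial group by the
-- cross product of the remaining dimensions, in product order
theorem fold_groups (pairs : List (String × List String))
    (gs : List (List (String × String))) :
    pairs.foldl ccpExpand gs
    = gs.flatMap (fun g =>
        (prodA (pairs.map Prod.snd)).map (fun combo => g ++ (pairs.map Prod.fst).zip combo)) := by
  induction pairs generalizing gs with
  | nil => simp [prodA]
  | cons kv rest ih =>
    rw [List.foldl_cons, ih]
    simp only [ccpExpand, prodA, List.map_cons, flatMap_flatMap', List.map_flatMap,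
      List.flatMap_map, List.map_map]
    apply List.flatMap_congr
    intro g _
    apply List.flatMap_congr
    intro v _
    apply List.map_congr_left
    intro combo _
    simp [List.zip_cons_cons, List.append_assoc]

-- ===== VERDICT (by name: the statement is the Claim_ definition above) =====
theorem compute_cross_product_spec : Claim_equal_compute_cross_product := by
  intro filters _ _
  unfold Spec_compute_cross_product compute_cross_product compute_cross_product_alt
  simp only [collect_eq_filter, List.nil_append]
  cases hF : filters.filter ccpKeep with
  | nil => simp
  | cons p ps =>
    simp only [List.map_cons, List.isEmpty_cons, Bool.false_eq_true, if_false, fold_groups,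
      List.flatMap_cons, List.flatMap_nil, List.append_nil, List.nil_append]
    refine congrArg₂ Prod.mk rfl ?_
    apply List.map_congr_left
    intro combo hcombo
    have hl := prodA_length _ _ hcombo
    rw [range_map_eq_zip]
    simpa using hl
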